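-- pv_equiv track=rewrite | github.com/Bringing-Buzzwords-Home/bringing_buzzwords_home | visualize/utilities.py | compare_ordered_months
-- ===== SOURCE A (Python) =====
-- def compare_ordered_months(ordered_months, state_ordered_months):
--     if len(ordered_months) != len(state_ordered_months):
--         for num, month in enumerate(ordered_months):
--             try:
--                 if month['year'] == state_ordered_months[num]['year'] and month['month'] == state_ordered_months[num]['month']:
--                     continue
--                 else:
--                     state_ordered_months.insert(num, {'year': month['year'],
--                                                       'month': month['month'],
--                                                       'pk__count': 0})
--             except IndexError:
--                 state_ordered_months.insert(num, {'year': month['year'],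
--                                                   'month': month['month'],
--                                                   'pk__count': 0})
--     return state_ordered_months
-- ===== SOURCE B (Python) =====
-- # Single forward merge pass appending to a new list instead of repeated list.insert into the old one;
-- # return-value equivalence only: unlike A, B does not mutate state_ordered_months in place.
-- def compare_ordered_months(ordered_months, state_ordered_months):
--     if len(ordered_months) == len(state_ordered_months):
--         return state_ordered_months
--     result = []
--     i = 0
--     for month in ordered_months:
--         if (i < len(state_ordered_months)
--                 and state_ordered_months[i]['year'] == month['year']
--                 and state_ordered_months[i]['month'] == month['month']):
--             result.append(state_ordered_months[i])
--             i += 1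
--         else:
--             result.append({'year': month['year'],
--                            'month': month['month'],
--                            'pk__count': 0})
--     result.extend(state_ordered_months[i:])
--     return result
-- ===== Notes on version B (the rewrite author's own statement) =====
-- stated objective: alternative
-- what changed: Replaces the index-and-insert loop (list.insert at the current position, try/except IndexError for the tail) with a single forward merge pass that appends matched state entries or zero-count placeholders to a fresh list and extends with the leftover tail; return-value equivalence only (A mutates state_ordered_months in place, B builds a new list).
import Mathlib
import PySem

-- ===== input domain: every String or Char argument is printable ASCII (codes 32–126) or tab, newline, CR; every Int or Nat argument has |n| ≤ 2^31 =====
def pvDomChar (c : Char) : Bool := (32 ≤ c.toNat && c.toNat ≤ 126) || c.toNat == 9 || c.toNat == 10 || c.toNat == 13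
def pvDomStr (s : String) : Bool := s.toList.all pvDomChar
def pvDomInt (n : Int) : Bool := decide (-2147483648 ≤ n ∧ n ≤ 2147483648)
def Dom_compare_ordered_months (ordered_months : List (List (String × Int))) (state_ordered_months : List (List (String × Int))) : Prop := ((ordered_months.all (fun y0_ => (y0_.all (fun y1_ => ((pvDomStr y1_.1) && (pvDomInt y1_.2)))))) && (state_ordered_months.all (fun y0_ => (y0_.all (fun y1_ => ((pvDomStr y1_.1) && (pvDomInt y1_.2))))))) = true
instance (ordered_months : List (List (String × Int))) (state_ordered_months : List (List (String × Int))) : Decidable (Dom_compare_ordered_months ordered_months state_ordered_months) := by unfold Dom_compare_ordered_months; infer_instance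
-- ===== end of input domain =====

-- B replaces A's index-and-insert loop by a single forward merge pass that appends to a new
-- list instead of inserting into the old one. Equivalence is about the RETURN value only:
-- the Python A mutates state_ordered_months in place, B builds a new list.

-- shared helpers: d[k] lookup with dict (last-write-wins) semantics, and the zero-count placeholder
def pvDGet (d : List (String × Int)) (k : String) : Int := (PySem.Dict.ofList d).getD k 0

def pvSame (m s : List (String × Int)) : Bool :=
  pvDGet m "year" == pvDGet s "year" && pvDGet m "month" == pvDGet s "month"

def pvPlaceholder (m : List (String × Int)) : List (String × Int) :=
  [("year", pvDGet m "year"), ("month", pvDGet m "month"), ("pk__count", 0)]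

-- ===== PORT A =====
-- loop body of A: compare ordered[num] with the current state[num]; IndexError (pyGet? = none)
-- and mismatch both insert the placeholder at position num
def pvStepA (st : List (List (String × Int))) (p : Int × List (String × Int)) :
    List (List (String × Int)) :=
  match PySem.List.pyGet? st p.1 with
  | some s => if pvSame p.2 s then st else PySem.List.insert st p.1 (pvPlaceholder p.2)
  | none => PySem.List.insert st p.1 (pvPlaceholder p.2)

def compare_ordered_months (ordered_months : List (List (String × Int))) (state_ordered_months : List (List (String × Int))) : List (List (String × Int)) :=
  if ordered_months.length ≠ state_ordered_months.length then
    (PySem.List.enumerate ordered_months).foldl pvStepA state_ordered_months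
  else state_ordered_months

-- ===== PORT B =====
-- loop body of B: accumulator = (result built so far, pointer i into state_ordered_months)
def pvStepB (sm : List (List (String × Int)))
    (acc : List (List (String × Int)) × Nat) (month : List (String × Int)) :
    List (List (String × Int)) × Nat :=
  if acc.2 < sm.length then
    let s := sm.getD acc.2 []
    if pvSame month s then (acc.1 ++ [s], acc.2 + 1)
    else (acc.1 ++ [pvPlaceholder month], acc.2)
  else (acc.1 ++ [pvPlaceholder month], acc.2)

def compare_ordered_months_alt (ordered_months : List (List (String × Int))) (state_ordered_months : List (List (String × Int))) : List (List (String × Int)) :=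
  if ordered_months.length == state_ordered_months.length then state_ordered_months
  else
    let acc := ordered_months.foldl (pvStepB state_ordered_months) ([], 0)
    acc.1 ++ state_ordered_months.drop acc.2

-- ===== PRECONDITION & SPEC =====
-- Pre_ excludes the inputs where the Python A raises KeyError: lengths differ and some month
-- dict lacks a 'year' or 'month' key.  It is slightly narrower than "A returns": it also
-- excludes unequal-length inputs whose missing key happens never to be looked up (A returns
-- there, and B returns the same value; see the cite in claim.json).
def Pre_compare_ordered_months (ordered_months : List (List (String × Int))) (state_ordered_months : List (List (String × Int))) : Prop :=
  ordered_months.length = state_ordered_months.length ∨ ordered_months = [] ∨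
  ((∀ m ∈ ordered_months, (PySem.Dict.ofList m).contains "year" = true ∧ (PySem.Dict.ofList m).contains "month" = true) ∧
   (∀ s ∈ state_ordered_months, (PySem.Dict.ofList s).contains "year" = true ∧ (PySem.Dict.ofList s).contains "month" = true))

instance (ordered_months : List (List (String × Int))) (state_ordered_months : List (List (String × Int))) : Decidable (Pre_compare_ordered_months ordered_months state_ordered_months) := by unfold Pre_compare_ordered_months; infer_instance

def pvWitness_compare_ordered_months : (List (List (String × Int))) × (List (List (String × Int))) :=
  ([[("year", 2015), ("month", 1)], [("year", 2015), ("month", 2)]],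
   [[("year", 2015), ("month", 2), ("pk__count", 7)]])

def Spec_compare_ordered_months (ordered_months : List (List (String × Int))) (state_ordered_months : List (List (String × Int))) (out : List (List (String × Int))) : Prop := out = compare_ordered_months_alt ordered_months state_ordered_months
instance (ordered_months : List (List (String × Int))) (state_ordered_months : List (List (String × Int))) (out : List (List (String × Int))) : Decidable (Spec_compare_ordered_months ordered_months state_ordered_months out) := by unfold Spec_compare_ordered_months; infer_instance

-- ===== CLAIM (what is proved, stated in full; the proofs are below) =====
def Claim_equal_compare_ordered_months : Prop := ∀ (ordered_months : List (List (String × Int))) (state_ordered_months : List (List (String × Int))), Dom_compare_ordered_months ordered_months state_ordered_months → Pre_compare_ordered_months ordered_months state_ordered_months → Spec_compare_ordered_months ordered_months state_ordered_months (compare_ordered_months ordered_months state_ordered_months)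

-- ===== LEMMAS AND PROOFS =====

-- the common mathematical object: the forward merge both loops compute
def pvMerge : List (List (String × Int)) → List (List (String × Int)) → List (List (String × Int))
  | [], rest => rest
  | o :: os, rest =>
    match rest with
    | [] => pvPlaceholder o :: pvMerge os []
    | r :: rs => if pvSame o r then r :: pvMerge os rs else pvPlaceholder o :: pvMerge os (r :: rs)

theorem foldA_eq_merge (os done rest : List (List (String × Int))) :
    (PySem.List.enumerate os (done.length : Int)).foldl pvStepA (done ++ rest)
      = done ++ pvMerge os rest := by
  induction os generalizing done rest with
  | nil => simp [PySem.List.enumerate_nil, pvMerge]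
  | cons o os ih =>
    rw [PySem.List.enumerate_cons, List.foldl_cons]
    have hstep : pvStepA (done ++ rest) ((done.length : Int), o)
        = match rest with
          | [] => done ++ [pvPlaceholder o]
          | r :: rs => if pvSame o r then done ++ (r :: rs)
                       else (done ++ [pvPlaceholder o]) ++ (r :: rs) := by
      cases rest with
      | nil =>
        simp only [pvStepA, List.append_nil, PySem.List.pyGet?_natCast, List.getElem?_eq_none (le_refl _)]
        exact PySem.List.insert_length done (pvPlaceholder o)
      | cons r rs =>
        simp only [pvStepA, PySem.List.pyGet?_append_length]
        by_cases hs : pvSame o r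
        · simp [hs]
        · simp only [hs, Bool.false_eq_true, if_false]
          rw [PySem.List.insert_natCast _ done.length _ (by simp),
              List.take_left, List.drop_left]
          simp
    cases rest with
    | nil =>
      rw [hstep]
      have := ih (done ++ [pvPlaceholder o]) []
      simp only [List.append_nil] at this ⊢
      rw [show ((done.length : Int) + 1) = (((done ++ [pvPlaceholder o]).length : Int)) by simp]
      rw [this]
      simp [pvMerge]
    | cons r rs =>
      rw [hstep]
      by_cases hs : pvSame o r
      · simp only [hs, if_true]
        rw [show (done ++ r :: rs) = ((done ++ [r]) ++ rs) by simp]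
        rw [show ((done.length : Int) + 1) = (((done ++ [r]).length : Int)) by simp]
        rw [ih (done ++ [r]) rs]
        simp [pvMerge, hs]
      · simp only [hs, Bool.false_eq_true, if_false]
        rw [show ((done.length : Int) + 1) = (((done ++ [pvPlaceholder o]).length : Int)) by simp]
        rw [ih (done ++ [pvPlaceholder o]) (r :: rs)]
        simp [pvMerge, hs]

theorem foldB_eq_merge (sm os : List (List (String × Int))) (res : List (List (String × Int))) (i : Nat) :
    (os.foldl (pvStepB sm) (res, i)).1 ++ sm.drop (os.foldl (pvStepB sm) (res, i)).2
      = res ++ pvMerge os (sm.drop i) := by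
  induction os generalizing res i with
  | nil => simp [pvMerge]
  | cons o os ih =>
    rw [List.foldl_cons]
    by_cases hlt : i < sm.length
    · have hdrop : sm.drop i = sm[i] :: sm.drop (i + 1) := List.drop_eq_getElem_cons hlt
      have hget : sm.getD i [] = sm[i] := List.getD_eq_getElem sm [] hlt
      by_cases hs : pvSame o sm[i]
      · rw [show pvStepB sm (res, i) o = (res ++ [sm[i]], i + 1) by
            simp [pvStepB, hlt, hs]]
        rw [ih, hdrop]
        simp [pvMerge, hs]
      · rw [show pvStepB sm (res, i) o = (res ++ [pvPlaceholder o], i) by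
            simp [pvStepB, hlt, hs]]
        rw [ih, hdrop]
        simp [pvMerge, hs, ← hdrop]
    · have hdrop : sm.drop i = [] := List.drop_eq_nil_of_le (le_of_not_gt hlt)
      rw [show pvStepB sm (res, i) o = (res ++ [pvPlaceholder o], i) by
          simp [pvStepB, hlt]]
      rw [ih, hdrop]
      simp [pvMerge]

-- ===== VERDICT (by name: the statement is the Claim_ definition above) =====
theorem compare_ordered_months_spec : Claim_equal_compare_ordered_months := by
  intro om sm _ _
  unfold Spec_compare_ordered_months compare_ordered_months compare_ordered_months_alt
  by_cases h : om.length = sm.length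
  · simp [h]
  · simp only [h, beq_iff_eq, if_pos (by exact h)]
    have hA := foldA_eq_merge om [] sm
    have hB := foldB_eq_merge sm om [] 0
    simpa using hA.trans hB.symm
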